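-- pv_equiv track=rewrite | github.com/wzk1015/video-bgm-generation | src/video2npz/visbeat3/build/lib/visbeat3/Event.py | SubsampleEveryN
-- ===== SOURCE A (Python) =====
-- def SubsampleEveryN(events, n, offset=0):
--     if (offset is None):
--         offset = 0;
--     newe = [];
--     for e in range(len(events)):
--         if (not ((e + offset) % n)):
--             newe.append(events[e]);
--     return newe;
-- ===== SOURCE B (Python) =====
-- def SubsampleEveryN(events, n, offset=0):
--     if offset is None:
--         offset = 0
--     step = abs(n)
--     start = (-offset) % step
--     return [events[i] for i in range(start, len(events), step)]
-- ===== Notes on version B (the rewrite author's own statement) =====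
-- stated objective: idiomatic
-- what changed: B replaces A's scan over every index with a modulo test by a direct stride: it computes the first selected index start = (-offset) % abs(n) in closed form and takes events[start::abs(n)], doing one modulo instead of one per element.
-- outside the precondition, e.g. on SubsampleEveryN([], 0, 0): A returns [], B raises ZeroDivisionError
import Mathlib
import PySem

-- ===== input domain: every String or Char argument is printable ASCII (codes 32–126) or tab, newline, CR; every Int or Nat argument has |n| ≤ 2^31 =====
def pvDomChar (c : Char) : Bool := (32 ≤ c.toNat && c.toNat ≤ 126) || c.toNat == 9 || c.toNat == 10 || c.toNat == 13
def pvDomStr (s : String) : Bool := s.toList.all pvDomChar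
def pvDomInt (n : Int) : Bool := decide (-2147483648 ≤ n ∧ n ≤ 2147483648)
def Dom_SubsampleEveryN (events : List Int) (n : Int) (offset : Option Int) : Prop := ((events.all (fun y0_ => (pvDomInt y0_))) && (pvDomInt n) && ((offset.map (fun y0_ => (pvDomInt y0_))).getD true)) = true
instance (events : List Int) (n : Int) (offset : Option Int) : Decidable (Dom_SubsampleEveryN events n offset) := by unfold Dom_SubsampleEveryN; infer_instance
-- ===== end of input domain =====

-- B selects every |n|-th element by a direct stride from the closed-form first index
-- (-offset) % |n| instead of A's per-index modulo filter (objective: idiomatic).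


-- ===== PORT A =====
def SubsampleEveryN (events : List Int) (n : Int) (offset : Option Int) : List Int :=
  let off : Int := offset.getD 0
  (PySem.List.pyRange 0 events.length 1).foldl
    (fun newe e =>
      if PySem.Int.mod (e + off) n == 0 then newe ++ [PySem.List.pyGetD events e 0] else newe)
    []

-- ===== PORT B =====
def SubsampleEveryN_alt (events : List Int) (n : Int) (offset : Option Int) : List Int :=
  let off : Int := offset.getD 0
  let step : Int := |n|
  let start : Int := PySem.Int.mod (-off) step
  (PySem.List.pyRange start events.length step).map (fun i => PySem.List.pyGetD events i 0)

-- ===== PRECONDITION & SPEC =====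
-- Pre_ excludes n = 0: with nonempty events A raises ZeroDivisionError there; on empty
-- events A happens to return [] (the modulo is never evaluated) while B's own modulo
-- still raises, so those inputs are excluded too.
def Pre_SubsampleEveryN (events : List Int) (n : Int) (offset : Option Int) : Prop := n ≠ 0
instance (events : List Int) (n : Int) (offset : Option Int) : Decidable (Pre_SubsampleEveryN events n offset) := by unfold Pre_SubsampleEveryN; infer_instance
def pvWitness_SubsampleEveryN : List Int × Int × Option Int := ([3, 1, 4, 1, 5, 9], 2, some 1)

def Spec_SubsampleEveryN (events : List Int) (n : Int) (offset : Option Int) (out : List Int) : Prop := out = SubsampleEveryN_alt events n offset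
instance (events : List Int) (n : Int) (offset : Option Int) (out : List Int) : Decidable (Spec_SubsampleEveryN events n offset out) := by unfold Spec_SubsampleEveryN; infer_instance

-- ===== CLAIM (what is proved, stated in full; the proofs are below) =====
def Claim_equal_SubsampleEveryN : Prop := ∀ (events : List Int) (n : Int) (offset : Option Int), Dom_SubsampleEveryN events n offset → Pre_SubsampleEveryN events n offset → Spec_SubsampleEveryN events n offset (SubsampleEveryN events n offset)

-- ===== LEMMAS AND PROOFS =====

-- Two strictly increasing lists with the same members are equal.
theorem pv_sorted_ext (l1 l2 : List Int) (h1 : l1.Pairwise (· < ·)) (h2 : l2.Pairwise (· < ·))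
    (hm : ∀ x, x ∈ l1 ↔ x ∈ l2) : l1 = l2 := by
  have hperm : l1.Perm l2 := by
    rw [List.perm_ext_iff_of_nodup h1.nodup h2.nodup]
    exact hm
  exact List.Perm.eq_of_pairwise (fun a b _ _ hab hba => absurd hba (asymm hab)) h1 h2 hperm

theorem pv_pairwise_pyRange_pos (a b s : Int) (hs : 0 < s) :
    (PySem.List.pyRange a b s).Pairwise (· < ·) := by
  rw [PySem.List.pyRange_of_pos a b hs]
  refine List.pairwise_map.mpr ?_
  refine List.Pairwise.imp ?_ (List.pairwise_lt_range)
  intro i j hij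
  have : (i : Int) < (j : Int) := by exact_mod_cast hij
  nlinarith

-- Core identity: the indices A keeps are exactly the strided range B walks.
theorem pv_filter_eq_stride (len n off : Int) (hn : n ≠ 0) :
    (PySem.List.pyRange 0 len 1).filter (fun e => PySem.Int.mod (e + off) n == 0) =
      PySem.List.pyRange (PySem.Int.mod (-off) |n|) len |n| := by
  have hstep : (0 : Int) < |n| := abs_pos.mpr hn
  set start := PySem.Int.mod (-off) |n| with hstart
  have hfd : start = (-off) - |n| * Int.fdiv (-off) |n| := by
    rw [hstart]; exact Int.fmod_def _ _
  have hstart0 : 0 ≤ start := by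
    have : start = (-off) % |n| := by
      rw [hstart, PySem.Int.mod, Int.fmod_eq_emod, if_pos (Or.inl (le_of_lt hstep)), add_zero]
    rw [this]; exact Int.emod_nonneg _ (ne_of_gt hstep)
  have hstartlt : start < |n| := by
    have : start = (-off) % |n| := by
      rw [hstart, PySem.Int.mod, Int.fmod_eq_emod, if_pos (Or.inl (le_of_lt hstep)), add_zero]
    rw [this]; exact Int.emod_lt_of_pos _ hstep
  have hdvd_start : |n| ∣ start + off := by
    refine ⟨-(Int.fdiv (-off) |n|), ?_⟩
    rw [hfd]; ring
  apply pv_sorted_ext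
  · exact (PySem.List.pairwise_lt_pyRange_one 0 len).filter _
  · exact pv_pairwise_pyRange_pos _ _ _ hstep
  · intro x
    rw [List.mem_filter, PySem.List.mem_pyRange_one, PySem.List.mem_pyRange_iff_of_pos hstep]
    constructor
    · rintro ⟨⟨hx0, hxlen⟩, hp⟩
      have hdvd : n ∣ x + off := Int.dvd_of_fmod_eq_zero (by simpa [PySem.Int.mod] using hp)
      have hdvd' : |n| ∣ x - start := by
        have h1 : |n| ∣ x + off := (abs_dvd _ _).mpr hdvd
        have h2 := Int.dvd_sub h1 hdvd_start
        have h3 : (x + off) - (start + off) = x - start := by ring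
        rwa [h3] at h2
      refine ⟨?_, hxlen, hdvd'⟩
      by_contra hlt
      rw [not_le] at hlt
      have hz : x - start = 0 := by
        refine Int.eq_zero_of_abs_lt_dvd hdvd' ?_
        rw [abs_lt]
        constructor <;> omega
      omega
    · rintro ⟨hsx, hxlen, hdvd⟩
      have hx0 : 0 ≤ x := le_trans hstart0 hsx
      refine ⟨⟨hx0, hxlen⟩, ?_⟩
      have hdvd' : n ∣ x + off := by
        rw [← abs_dvd]
        have h2 := dvd_add hdvd hdvd_start
        have h3 : (x - start) + (start + off) = x + off := by ring
        rwa [h3] at h2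
      simp [PySem.Int.mod, Int.fmod_eq_zero_of_dvd hdvd']

-- ===== VERDICT (by name: the statement is the Claim_ definition above) =====
theorem SubsampleEveryN_spec : Claim_equal_SubsampleEveryN := by
  intro events n offset _ hn
  unfold Spec_SubsampleEveryN SubsampleEveryN SubsampleEveryN_alt
  simp only []
  rw [PySem.List.foldl_append_if, List.nil_append,
      pv_filter_eq_stride (events.length) n (offset.getD 0) hn]
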